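-- pv_equiv track=rewrite | github.com/Toro7777/FITS_Database | fits_gui_database.py | _format_filter_names_as_matrix
-- ===== SOURCE A (Python) =====
-- from typing import Dict, List, Tuple, Optional
--
-- def _format_filter_names_as_matrix(filter_names: List[str]) -> str:
--     """
--     Format filter names as a simple space-separated list of acronyms
--     Example: "L R G B" or "L R G B Other"
--     """
--     # Normalize filter name to abbreviation
--     abbrev_map = {
--         'L': 'L', 'Luminosity': 'L', 'luminosity': 'L',
--         'R': 'R', 'Red': 'R', 'red': 'R',
--         'G': 'G', 'Green': 'G', 'green': 'G',
--         'B': 'B', 'Blue': 'B', 'blue': 'B',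
--         'Ha': 'H', 'H': 'H', 'h': 'H', 'Alpha': 'H', 'HALPHA': 'H', 'halpha': 'H', 'Halpha': 'H',
--         'OIII': 'O', 'O': 'O', 'o': 'O', 'O3': 'O', 'o3': 'O',
--         'SII': 'S', 'S': 'S', 's': 'S', 'S2': 'S', 's2': 'S',
--     }
--
--     # Standard filter order
--     standard_filters = ['L', 'R', 'G', 'B', 'H', 'O', 'S']
--
--     # Normalize and collect present filters
--     present_abbrevs = set()
--     has_other = False
--     for fname in filter_names:
--         # Try direct match first
--         if fname in abbrev_map:
--             present_abbrevs.add(abbrev_map[fname])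
--         elif fname.upper() in abbrev_map:
--             present_abbrevs.add(abbrev_map[fname.upper()])
--         elif fname.lower() in abbrev_map:
--             present_abbrevs.add(abbrev_map[fname.lower()])
--         else:
--             # Unknown filter type
--             has_other = True
--
--     # Build filter string with only present filters
--     result_abbrevs = []
--     for filt in standard_filters:
--         if filt in present_abbrevs:
--             result_abbrevs.append(filt)
--
--     # Add "Other" only if there are unknown filters
--     if has_other:
--         result_abbrevs.append("Other")
--
--     return " ".join(result_abbrevs) if result_abbrevs else "(none)"
-- ===== SOURCE B (Python) =====
-- def _format_filter_names_as_matrix(filter_names):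
--     """
--     Format filter names as a simple space-separated list of acronyms
--     Example: "L R G B" or "L R G B Other"
--     """
--     abbrev_map = {
--         'L': 'L', 'Luminosity': 'L', 'luminosity': 'L',
--         'R': 'R', 'Red': 'R', 'red': 'R',
--         'G': 'G', 'Green': 'G', 'green': 'G',
--         'B': 'B', 'Blue': 'B', 'blue': 'B',
--         'Ha': 'H', 'H': 'H', 'h': 'H', 'Alpha': 'H', 'HALPHA': 'H', 'halpha': 'H', 'Halpha': 'H',
--         'OIII': 'O', 'O': 'O', 'o': 'O', 'O3': 'O', 'o3': 'O',
--         'SII': 'S', 'S': 'S', 's': 'S', 'S2': 'S', 's2': 'S',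
--     }
--     parts = [
--         a for a in ('L', 'R', 'G', 'B', 'H', 'O', 'S')
--         if any(any(abbrev_map.get(x) == a for x in (n, n.upper(), n.lower()))
--                for n in filter_names)
--     ]
--     if any(all(x not in abbrev_map for x in (n, n.upper(), n.lower()))
--            for n in filter_names):
--         parts.append("Other")
--     return " ".join(parts) if parts else "(none)"
-- ===== Notes on version B (the rewrite author's own statement) =====
-- stated objective: alternative
-- what changed: A makes one pass over the names building a set of abbreviations via a priority lookup chain and then scans the standard order against that set; B drops the set entirely and, for each abbreviation in standard order, scans the names testing whether any of the three cased forms maps to that abbreviation by direct reverse lookup.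
import Mathlib
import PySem

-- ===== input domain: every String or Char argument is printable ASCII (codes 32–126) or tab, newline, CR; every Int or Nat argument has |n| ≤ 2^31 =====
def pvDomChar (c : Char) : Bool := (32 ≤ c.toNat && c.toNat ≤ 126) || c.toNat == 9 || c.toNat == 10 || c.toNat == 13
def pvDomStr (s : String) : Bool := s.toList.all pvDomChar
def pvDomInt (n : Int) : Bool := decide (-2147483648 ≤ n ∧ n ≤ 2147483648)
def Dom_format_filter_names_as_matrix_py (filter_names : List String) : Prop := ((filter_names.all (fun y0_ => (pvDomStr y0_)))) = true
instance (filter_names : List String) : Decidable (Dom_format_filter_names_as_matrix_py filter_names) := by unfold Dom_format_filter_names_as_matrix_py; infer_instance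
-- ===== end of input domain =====

-- B replaces A's one-pass set-building loop (priority lookup per name, then a scan of the
-- standard order against the set) by a per-abbreviation scan of the names with a direct
-- reverse lookup; same cost, different decomposition (objective: alternative).

-- shared literal table (both Pythons define the same dict literal)
def pvAbbrevMap : PySem.Dict String String := PySem.Dict.ofList [
  ("L", "L"), ("Luminosity", "L"), ("luminosity", "L"),
  ("R", "R"), ("Red", "R"), ("red", "R"),
  ("G", "G"), ("Green", "G"), ("green", "G"),
  ("B", "B"), ("Blue", "B"), ("blue", "B"),
  ("Ha", "H"), ("H", "H"), ("h", "H"), ("Alpha", "H"), ("HALPHA", "H"), ("halpha", "H"), ("Halpha", "H"),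
  ("OIII", "O"), ("O", "O"), ("o", "O"), ("O3", "O"), ("o3", "O"),
  ("SII", "S"), ("S", "S"), ("s", "S"), ("S2", "S"), ("s2", "S")]

def pvStandard : List String := ["L", "R", "G", "B", "H", "O", "S"]

-- ===== PORT A =====
def pvNormStep (st : PySem.Set String × Bool) (fname : String) : PySem.Set String × Bool :=
  match pvAbbrevMap.get? fname with
  | some v => (PySem.Set.add st.1 v, st.2)
  | none =>
    match pvAbbrevMap.get? (PySem.Str.upper fname) with
    | some v => (PySem.Set.add st.1 v, st.2)
    | none =>
      match pvAbbrevMap.get? (PySem.Str.lower fname) with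
      | some v => (PySem.Set.add st.1 v, st.2)
      | none => (st.1, true)

def format_filter_names_as_matrix_py (filter_names : List String) : String :=
  let st := filter_names.foldl pvNormStep (PySem.Set.empty, false)
  let result1 := pvStandard.foldl (fun acc filt => if PySem.Set.contains st.1 filt then acc ++ [filt] else acc) []
  let result2 := if st.2 then result1 ++ ["Other"] else result1
  if result2 = [] then "(none)" else PySem.Str.join " " result2

-- ===== PORT B =====
def pvForms (n : String) : List String := [n, PySem.Str.upper n, PySem.Str.lower n]

def format_filter_names_as_matrix_py_alt (filter_names : List String) : String :=
  let parts1 := pvStandard.filter (fun a =>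
    filter_names.any (fun n => (pvForms n).any (fun x => pvAbbrevMap.get? x == some a)))
  let parts2 := if filter_names.any (fun n => (pvForms n).all (fun x => !(pvAbbrevMap.contains x)))
    then parts1 ++ ["Other"] else parts1
  if parts2 = [] then "(none)" else PySem.Str.join " " parts2

-- ===== PRECONDITION & SPEC =====
def Spec_format_filter_names_as_matrix_py (filter_names : List String) (out : String) : Prop := out = format_filter_names_as_matrix_py_alt filter_names
instance (filter_names : List String) (out : String) : Decidable (Spec_format_filter_names_as_matrix_py filter_names out) := by unfold Spec_format_filter_names_as_matrix_py; infer_instance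

-- ===== CLAIM (what is proved, stated in full; the proofs are below) =====
def Claim_equal_format_filter_names_as_matrix_py : Prop := ∀ (filter_names : List String), Dom_format_filter_names_as_matrix_py filter_names → Spec_format_filter_names_as_matrix_py filter_names (format_filter_names_as_matrix_py filter_names)

-- ===== LEMMAS AND PROOFS =====

-- the classification A performs per name (direct, then upper, then lower lookup); proof-only helper
def pvClassify (n : String) : Option String :=
  match pvAbbrevMap.get? n with
  | some v => some v
  | none =>
    match pvAbbrevMap.get? (PySem.Str.upper n) with
    | some v => some v
    | none => pvAbbrevMap.get? (PySem.Str.lower n)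

theorem pv_char_le_iff (a c : Char) : (a ≤ c) ↔ (a.toNat ≤ c.toNat) := Iff.rfl

theorem pv_lowerChar_upperChar (c : Char) :
    PySem.Chars.lowerChar (PySem.Chars.upperChar c) = PySem.Chars.lowerChar c := by
  unfold PySem.Chars.lowerChar PySem.Chars.upperChar PySem.Chars.islower PySem.Chars.isupper
  by_cases hl : ('a' ≤ c ∧ c ≤ 'z')
  · have h1 : 97 ≤ c.toNat := hl.1
    have h2 : c.toNat ≤ 122 := hl.2
    have hv : (Char.ofNat (c.toNat - 32)).toNat = c.toNat - 32 := by
      rw [Char.toNat_ofNat, if_pos (Or.inl (by omega))]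
    have hinner : (if (decide ('a' ≤ c) && decide (c ≤ 'z')) = true then Char.ofNat (c.toNat - 32) else c) = Char.ofNat (c.toNat - 32) :=
      if_pos (by simp only [Bool.and_eq_true, decide_eq_true_eq]; exact hl)
    rw [hinner]
    have hA : 'A' ≤ Char.ofNat (c.toNat - 32) := by
      rw [pv_char_le_iff, hv]; show 65 ≤ _; omega
    have hZ : Char.ofNat (c.toNat - 32) ≤ 'Z' := by
      rw [pv_char_le_iff, hv]; show _ ≤ 90; omega
    have hnA : ¬('A' ≤ c ∧ c ≤ 'Z') := by
      rw [pv_char_le_iff, pv_char_le_iff]; show ¬(65 ≤ _ ∧ _ ≤ 90); omega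
    rw [if_pos (by simp only [Bool.and_eq_true, decide_eq_true_eq]; exact ⟨hA, hZ⟩)]
    rw [if_neg (by simp only [Bool.and_eq_true, decide_eq_true_eq]; exact hnA)]
    rw [hv, show c.toNat - 32 + 32 = c.toNat by omega]
    exact Char.ofNat_toNat c
  · have hinner : (if (decide ('a' ≤ c) && decide (c ≤ 'z')) = true then Char.ofNat (c.toNat - 32) else c) = c :=
      if_neg (by simp only [Bool.and_eq_true, decide_eq_true_eq]; exact hl)
    rw [hinner]

theorem pv_lower_upper (s : String) :
    PySem.Str.lower (PySem.Str.upper s) = PySem.Str.lower s := by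
  apply String.toList_inj.mp
  rw [PySem.Str.toList_lower, PySem.Str.toList_lower, PySem.Str.toList_upper]
  unfold PySem.Chars.lower PySem.Chars.upper
  rw [List.map_map]
  exact List.map_congr_left (fun c _ => pv_lowerChar_upperChar c)

theorem pv_items : pvAbbrevMap.items = [
  ("L", "L"), ("Luminosity", "L"), ("luminosity", "L"),
  ("R", "R"), ("Red", "R"), ("red", "R"),
  ("G", "G"), ("Green", "G"), ("green", "G"),
  ("B", "B"), ("Blue", "B"), ("blue", "B"),
  ("Ha", "H"), ("H", "H"), ("h", "H"), ("Alpha", "H"), ("HALPHA", "H"), ("halpha", "H"), ("Halpha", "H"),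
  ("OIII", "O"), ("O", "O"), ("o", "O"), ("O3", "O"), ("o3", "O"),
  ("SII", "S"), ("S", "S"), ("s", "S"), ("S2", "S"), ("s2", "S")] := by decide

theorem pv_get_cases {n v : String} (h : pvAbbrevMap.get? n = some v) :
    (n = "L" ∧ v = "L") ∨ (n = "Luminosity" ∧ v = "L") ∨ (n = "luminosity" ∧ v = "L") ∨
    (n = "R" ∧ v = "R") ∨ (n = "Red" ∧ v = "R") ∨ (n = "red" ∧ v = "R") ∨
    (n = "G" ∧ v = "G") ∨ (n = "Green" ∧ v = "G") ∨ (n = "green" ∧ v = "G") ∨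
    (n = "B" ∧ v = "B") ∨ (n = "Blue" ∧ v = "B") ∨ (n = "blue" ∧ v = "B") ∨
    (n = "Ha" ∧ v = "H") ∨ (n = "H" ∧ v = "H") ∨ (n = "h" ∧ v = "H") ∨ (n = "Alpha" ∧ v = "H") ∨
    (n = "HALPHA" ∧ v = "H") ∨ (n = "halpha" ∧ v = "H") ∨ (n = "Halpha" ∧ v = "H") ∨
    (n = "OIII" ∧ v = "O") ∨ (n = "O" ∧ v = "O") ∨ (n = "o" ∧ v = "O") ∨ (n = "O3" ∧ v = "O") ∨
    (n = "o3" ∧ v = "O") ∨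
    (n = "SII" ∧ v = "S") ∨ (n = "S" ∧ v = "S") ∨ (n = "s" ∧ v = "S") ∨ (n = "S2" ∧ v = "S") ∨
    (n = "s2" ∧ v = "S") := by
  have hm := PySem.Dict.mem_items_of_get?_eq_some _ h
  rw [pv_items] at hm
  simpa only [List.mem_cons, List.not_mem_nil, or_false, Prod.mk.injEq] using hm

-- the three cased lookups of one name can never disagree on the abbreviation
theorem pv_cons_up {n b : String} (h : pvAbbrevMap.get? n = some b) :
    pvAbbrevMap.get? (PySem.Str.upper n) = none ∨ pvAbbrevMap.get? (PySem.Str.upper n) = some b := by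
  rcases pv_get_cases h with (⟨rfl, rfl⟩|⟨rfl, rfl⟩|⟨rfl, rfl⟩|⟨rfl, rfl⟩|⟨rfl, rfl⟩|⟨rfl, rfl⟩|⟨rfl, rfl⟩|⟨rfl, rfl⟩|⟨rfl, rfl⟩|⟨rfl, rfl⟩|⟨rfl, rfl⟩|⟨rfl, rfl⟩|⟨rfl, rfl⟩|⟨rfl, rfl⟩|⟨rfl, rfl⟩|⟨rfl, rfl⟩|⟨rfl, rfl⟩|⟨rfl, rfl⟩|⟨rfl, rfl⟩|⟨rfl, rfl⟩|⟨rfl, rfl⟩|⟨rfl, rfl⟩|⟨rfl, rfl⟩|⟨rfl, rfl⟩|⟨rfl, rfl⟩|⟨rfl, rfl⟩|⟨rfl, rfl⟩|⟨rfl, rfl⟩|⟨rfl, rfl⟩) <;> decide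

theorem pv_cons_low {n b : String} (h : pvAbbrevMap.get? n = some b) :
    pvAbbrevMap.get? (PySem.Str.lower n) = none ∨ pvAbbrevMap.get? (PySem.Str.lower n) = some b := by
  rcases pv_get_cases h with (⟨rfl, rfl⟩|⟨rfl, rfl⟩|⟨rfl, rfl⟩|⟨rfl, rfl⟩|⟨rfl, rfl⟩|⟨rfl, rfl⟩|⟨rfl, rfl⟩|⟨rfl, rfl⟩|⟨rfl, rfl⟩|⟨rfl, rfl⟩|⟨rfl, rfl⟩|⟨rfl, rfl⟩|⟨rfl, rfl⟩|⟨rfl, rfl⟩|⟨rfl, rfl⟩|⟨rfl, rfl⟩|⟨rfl, rfl⟩|⟨rfl, rfl⟩|⟨rfl, rfl⟩|⟨rfl, rfl⟩|⟨rfl, rfl⟩|⟨rfl, rfl⟩|⟨rfl, rfl⟩|⟨rfl, rfl⟩|⟨rfl, rfl⟩|⟨rfl, rfl⟩|⟨rfl, rfl⟩|⟨rfl, rfl⟩|⟨rfl, rfl⟩) <;> decide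

theorem pv_cons_up_low {n b : String} (h : pvAbbrevMap.get? (PySem.Str.upper n) = some b) :
    pvAbbrevMap.get? (PySem.Str.lower n) = none ∨ pvAbbrevMap.get? (PySem.Str.lower n) = some b := by
  rw [← pv_lower_upper n]
  rcases pv_get_cases h with (⟨h1, rfl⟩|⟨h1, rfl⟩|⟨h1, rfl⟩|⟨h1, rfl⟩|⟨h1, rfl⟩|⟨h1, rfl⟩|⟨h1, rfl⟩|⟨h1, rfl⟩|⟨h1, rfl⟩|⟨h1, rfl⟩|⟨h1, rfl⟩|⟨h1, rfl⟩|⟨h1, rfl⟩|⟨h1, rfl⟩|⟨h1, rfl⟩|⟨h1, rfl⟩|⟨h1, rfl⟩|⟨h1, rfl⟩|⟨h1, rfl⟩|⟨h1, rfl⟩|⟨h1, rfl⟩|⟨h1, rfl⟩|⟨h1, rfl⟩|⟨h1, rfl⟩|⟨h1, rfl⟩|⟨h1, rfl⟩|⟨h1, rfl⟩|⟨h1, rfl⟩|⟨h1, rfl⟩) <;> rw [h1] <;> decide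

theorem pv_forms_iff (n a : String) :
    (pvAbbrevMap.get? n = some a ∨ pvAbbrevMap.get? (PySem.Str.upper n) = some a ∨
      pvAbbrevMap.get? (PySem.Str.lower n) = some a) ↔ pvClassify n = some a := by
  unfold pvClassify
  constructor
  · rintro (h | h | h)
    · rw [h]
    · cases hn : pvAbbrevMap.get? n with
      | none => rw [h]
      | some b =>
        rcases pv_cons_up hn with hu | hu
        · rw [hu] at h; cases h
        · rw [hu] at h; exact h
    · cases hn : pvAbbrevMap.get? n with
      | some b =>
        rcases pv_cons_low hn with hl | hl
        · rw [hl] at h; cases h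
        · rw [hl] at h; exact h
      | none =>
        cases hu : pvAbbrevMap.get? (PySem.Str.upper n) with
        | none => exact h
        | some b =>
          rcases pv_cons_up_low hu with hl | hl
          · rw [hl] at h; cases h
          · rw [hl] at h; exact h
  · intro h
    cases hn : pvAbbrevMap.get? n with
    | some b => rw [hn] at h; exact Or.inl h
    | none =>
      rw [hn] at h
      cases hu : pvAbbrevMap.get? (PySem.Str.upper n) with
      | some b => rw [hu] at h; exact Or.inr (Or.inl h)
      | none => rw [hu] at h; exact Or.inr (Or.inr h)

theorem pv_other_iff (n : String) :
    ((pvForms n).all (fun x => !(pvAbbrevMap.contains x)) = true) ↔ pvClassify n = none := by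
  unfold pvClassify
  cases hn : pvAbbrevMap.get? n <;>
    cases hu : pvAbbrevMap.get? (PySem.Str.upper n) <;>
      cases hl : pvAbbrevMap.get? (PySem.Str.lower n) <;>
        simp [pvForms, PySem.Dict.contains_eq_isSome_get?, hn, hu, hl]

theorem pv_step_classify (st : PySem.Set String × Bool) (n : String) :
    pvNormStep st n = match pvClassify n with
      | some v => (PySem.Set.add st.1 v, st.2)
      | none => (st.1, true) := by
  unfold pvNormStep pvClassify
  cases pvAbbrevMap.get? n <;>
    cases pvAbbrevMap.get? (PySem.Str.upper n) <;>
      cases pvAbbrevMap.get? (PySem.Str.lower n) <;> rfl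

theorem pv_contains_iff (s : PySem.Set String) (a : String) :
    PySem.Set.contains s a = true ↔ a ∈ s := by simp [PySem.Set.contains]

theorem pv_fold_spec (names : List String) (S : PySem.Set String) (b : Bool) :
    (∀ a, PySem.Set.contains (names.foldl pvNormStep (S, b)).1 a = true ↔
        (PySem.Set.contains S a = true ∨ ∃ n ∈ names, pvClassify n = some a)) ∧
    ((names.foldl pvNormStep (S, b)).2 = (b || names.any (fun n => (pvClassify n).isNone))) := by
  induction names generalizing S b with
  | nil => simp
  | cons m ms ih =>
    rw [List.foldl_cons, pv_step_classify]
    cases hc : pvClassify m with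
    | some v =>
      simp only []
      obtain ⟨ih1, ih2⟩ := ih (PySem.Set.add S v) b
      constructor
      · intro a
        rw [ih1]
        simp only [pv_contains_iff, PySem.Set.mem_add]
        constructor
        · rintro ((h | rfl) | ⟨n, hn, hp⟩)
          · exact Or.inl h
          · exact Or.inr ⟨m, List.mem_cons_self .., hc⟩
          · exact Or.inr ⟨n, List.mem_cons_of_mem _ hn, hp⟩
        · rintro (h | ⟨n, hn, hp⟩)
          · exact Or.inl (Or.inl h)
          · rcases List.mem_cons.mp hn with rfl | hn'
            · rw [hc] at hp; cases hp; exact Or.inl (Or.inr rfl)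
            · exact Or.inr ⟨n, hn', hp⟩
      · rw [ih2]; simp [hc]
    | none =>
      simp only []
      obtain ⟨ih1, ih2⟩ := ih S true
      constructor
      · intro a
        rw [ih1]
        simp [hc]
      · rw [ih2]; simp [hc]

-- ===== VERDICT (by name: the statement is the Claim_ definition above) =====
theorem format_filter_names_as_matrix_py_spec : Claim_equal_format_filter_names_as_matrix_py := by
  intro names _hdom
  unfold Spec_format_filter_names_as_matrix_py
  unfold format_filter_names_as_matrix_py format_filter_names_as_matrix_py_alt
  dsimp only
  obtain ⟨h1, h2⟩ := pv_fold_spec names PySem.Set.empty false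
  have hfold : pvStandard.foldl (fun acc filt => if PySem.Set.contains (names.foldl pvNormStep (PySem.Set.empty, false)).1 filt then acc ++ [filt] else acc) [] =
      pvStandard.filter (fun filt => PySem.Set.contains (names.foldl pvNormStep (PySem.Set.empty, false)).1 filt) := by
    simpa using PySem.List.foldl_append_if
      (fun filt => PySem.Set.contains (names.foldl pvNormStep (PySem.Set.empty, false)).1 filt) id pvStandard []
  have hfilter : pvStandard.filter (fun filt => PySem.Set.contains (names.foldl pvNormStep (PySem.Set.empty, false)).1 filt) =
      pvStandard.filter (fun a => names.any (fun n => (pvForms n).any (fun x => pvAbbrevMap.get? x == some a))) := by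
    apply List.filter_congr
    intro x _hx
    rw [Bool.eq_iff_iff, h1 x]
    simp only [List.any_eq_true, pvForms, List.any_cons, List.any_nil, Bool.or_false,
      Bool.or_eq_true, beq_iff_eq]
    constructor
    · rintro (h | ⟨n, hn, hp⟩)
      · simp [PySem.Set.contains, PySem.Set.empty] at h
      · exact ⟨n, hn, (pv_forms_iff n x).mpr hp⟩
    · rintro ⟨n, hn, hp⟩
      exact Or.inr ⟨n, hn, (pv_forms_iff n x).mp hp⟩
  have hflag : (names.foldl pvNormStep (PySem.Set.empty, false)).2 =
      names.any (fun n => (pvForms n).all (fun x => !(pvAbbrevMap.contains x))) := by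
    rw [h2, Bool.false_or]
    refine List.any_congr rfl (fun n => ?_)
    rw [Bool.eq_iff_iff, Option.isNone_iff_eq_none]
    exact (pv_other_iff n).symm
  rw [hfold, hfilter, hflag]
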